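-- pv_equiv track=rewrite | github.com/m02417710-maker/-stock---ai--analyst-arabic-stock-analysis-bot- | security.py | prevent_xss
-- ===== SOURCE A (Python) =====
-- def prevent_xss(text: str) -> str:
--     """
--     تحويل النص لمنع هجمات XSS
--     """
--     if not text:
--         return ""
--
--     # استبدال الأحرف الخطيرة بنظيراتها الآمنة
--     replacements = {
--         '&': '&amp;',
--         '<': '&lt;',
--         '>': '&gt;',
--         '"': '&quot;',
--         "'": '&#x27;',
--         '/': '&#x2F;',
--     }
--
--     for char, replacement in replacements.items():
--         text = text.replace(char, replacement)
--
--     return text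
-- ===== SOURCE B (Python) =====
-- def _escape_char(c: str) -> str:
--     """Escaped form of a single character (identity if not dangerous)."""
--     if c == '&':
--         return '&amp;'
--     if c == '<':
--         return '&lt;'
--     if c == '>':
--         return '&gt;'
--     if c == '"':
--         return '&quot;'
--     if c == "'":
--         return '&#x27;'
--     if c == '/':
--         return '&#x2F;'
--     return c
--
-- def prevent_xss(text: str) -> str:
--     """HTML-escape dangerous characters to prevent XSS (single pass, no dict)."""
--     parts = []
--     for c in text:
--         parts.append(_escape_char(c))
--     return ''.join(parts)
-- ===== Notes on version B (the rewrite author's own statement) =====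
-- stated objective: alternative
-- what changed: Replaces six sequential full-string .replace() passes (and the replacements dict) with one accumulator loop over the characters, appending each character's escaped form chosen by an if-chain helper and joining once; the empty-string guard disappears since joining no parts yields the empty string.
import Mathlib
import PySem

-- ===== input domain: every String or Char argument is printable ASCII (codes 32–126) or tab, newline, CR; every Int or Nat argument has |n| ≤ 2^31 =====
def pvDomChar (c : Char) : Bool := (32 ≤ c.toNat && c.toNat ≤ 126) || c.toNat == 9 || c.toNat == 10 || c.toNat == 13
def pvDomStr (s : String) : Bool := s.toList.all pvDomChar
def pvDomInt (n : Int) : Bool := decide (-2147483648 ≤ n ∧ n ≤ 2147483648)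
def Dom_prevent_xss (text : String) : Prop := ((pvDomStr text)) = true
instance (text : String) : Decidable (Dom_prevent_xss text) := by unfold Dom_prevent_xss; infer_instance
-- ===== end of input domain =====

-- B replaces A's six sequential full-string .replace passes (and the dict) by one accumulator
-- loop over the characters with an if-chain escape helper, joined once (objective: alternative).


-- ===== PORT A =====
def prevent_xss (text : String) : String :=
  if text = "" then ""
  else
    let replacements : PySem.Dict String String :=
      PySem.Dict.ofList [("&", "&amp;"), ("<", "&lt;"), (">", "&gt;"),
                         ("\"", "&quot;"), ("'", "&#x27;"), ("/", "&#x2F;")]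
    replacements.items.foldl (fun t p => PySem.Str.replace t p.1 p.2) text

-- ===== PORT B =====
/-- `_escape_char`: escaped form of a single character (identity if not dangerous). -/
def pvEscapeChar (c : Char) : String :=
  if c = '&' then "&amp;"
  else if c = '<' then "&lt;"
  else if c = '>' then "&gt;"
  else if c = '"' then "&quot;"
  else if c = '\'' then "&#x27;"
  else if c = '/' then "&#x2F;"
  else String.ofList [c]

def prevent_xss_alt (text : String) : String :=
  PySem.Str.join ""
    (text.toList.foldl (fun parts c => parts ++ [pvEscapeChar c]) [])

-- ===== PRECONDITION & SPEC =====
def Spec_prevent_xss (text : String) (out : String) : Prop := out = prevent_xss_alt text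
instance (text : String) (out : String) : Decidable (Spec_prevent_xss text out) := by unfold Spec_prevent_xss; infer_instance

-- ===== CLAIM (what is proved, stated in full; the proofs are below) =====
def Claim_equal_prevent_xss : Prop := ∀ (text : String), Dom_prevent_xss text → Spec_prevent_xss text (prevent_xss text)

-- ===== LEMMAS AND PROOFS =====

/-- one replacement rule applied to a single character -/
def pvG (a : Char) (ns : List Char) (c : Char) : List Char := if c == a then ns else [c]

/-- the combined escape of one character, as a character list -/
def pvEsc (c : Char) : List Char :=
  if c == '&' then "&amp;".toList
  else if c == '<' then "&lt;".toList
  else if c == '>' then "&gt;".toList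
  else if c == '"' then "&quot;".toList
  else if c == '\'' then "&#x27;".toList
  else if c == '/' then "&#x2F;".toList
  else [c]

theorem pv_go_single (a : Char) (ns : List Char) :
    ∀ (fuel : Nat) (l acc : List Char), l.length ≤ fuel →
      PySem.Chars.replace.go [a] ns fuel l acc = acc.reverse ++ l.flatMap (pvG a ns) := by
  intro fuel
  induction fuel with
  | zero =>
    intro l acc h
    rw [List.length_eq_zero_iff.mp (Nat.le_zero.mp h)]
    simp [PySem.Chars.replace.go]
  | succ n ih =>
    intro l acc h
    cases l with
    | nil => simp [PySem.Chars.replace.go]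
    | cons c t =>
      simp only [PySem.Chars.replace.go, List.isPrefixOf]
      by_cases hc : c = a
      · simp [pvG, hc, ih t _ (by simpa using h)]
      · simp [pvG, hc, ih t _ (by simpa using h), Ne.symm hc]

theorem pv_replace_single (a : Char) (ns l : List Char) :
    PySem.Chars.replace l [a] ns = l.flatMap (pvG a ns) := by
  simp [PySem.Chars.replace, pv_go_single a ns l.length l [] le_rfl]

theorem pv_join_nil (xs : List (List Char)) : PySem.Chars.join [] xs = xs.flatten := by
  induction xs with
  | nil => simp [PySem.Chars.join, List.intercalate]
  | cons h t ih =>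
    cases t with
    | nil => simp [PySem.Chars.join, List.intercalate]
    | cons h2 t2 => rw [PySem.Chars.join_cons_cons]; simp_all

/-- the six chained per-character rules collapse to the combined escape -/
theorem pv_chain_eq (c : Char) :
    (((((pvG '&' "&amp;".toList c).flatMap (pvG '<' "&lt;".toList)).flatMap
        (pvG '>' "&gt;".toList)).flatMap (pvG '"' "&quot;".toList)).flatMap
        (pvG '\'' "&#x27;".toList)).flatMap (pvG '/' "&#x2F;".toList) = pvEsc c := by
  by_cases h1 : c = '&'; · subst h1; rfl
  by_cases h2 : c = '<'; · subst h2; rfl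
  by_cases h3 : c = '>'; · subst h3; rfl
  by_cases h4 : c = '"'; · subst h4; rfl
  by_cases h5 : c = '\''; · subst h5; rfl
  by_cases h6 : c = '/'; · subst h6; rfl
  simp [pvG, pvEsc, h1, h2, h3, h4, h5, h6]

theorem pv_main (l : List Char) :
    ((((((l.flatMap (pvG '&' "&amp;".toList)).flatMap (pvG '<' "&lt;".toList)).flatMap
        (pvG '>' "&gt;".toList)).flatMap (pvG '"' "&quot;".toList)).flatMap
        (pvG '\'' "&#x27;".toList)).flatMap (pvG '/' "&#x2F;".toList)) = l.flatMap pvEsc := by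
  induction l with
  | nil => rfl
  | cons c t ih =>
    simp only [List.flatMap_cons, List.flatMap_append]
    rw [ih, pv_chain_eq]

/-- B's helper computes the combined escape -/
theorem pv_escapeChar_toList (c : Char) : (pvEscapeChar c).toList = pvEsc c := by
  unfold pvEscapeChar pvEsc
  by_cases h1 : c = '&'; · subst h1; rfl
  by_cases h2 : c = '<'; · subst h2; rfl
  by_cases h3 : c = '>'; · subst h3; rfl
  by_cases h4 : c = '"'; · subst h4; rfl
  by_cases h5 : c = '\''; · subst h5; rfl
  by_cases h6 : c = '/'; · subst h6; rfl
  simp [h1, h2, h3, h4, h5, h6]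

/-- B's append-accumulator loop is a map -/
theorem pv_foldl_append {α β : Type} (f : α → β) :
    ∀ (l : List α) (acc : List β),
      l.foldl (fun parts c => parts ++ [f c]) acc = acc ++ l.map f := by
  intro l
  induction l with
  | nil => simp
  | cons c t ih => intro acc; simp [ih]

-- ===== VERDICT (by name: the statement is the Claim_ definition above) =====
theorem prevent_xss_spec : Claim_equal_prevent_xss := by
  intro text _
  unfold Spec_prevent_xss prevent_xss prevent_xss_alt
  rw [pv_foldl_append, List.nil_append]
  by_cases he : text = ""
  · subst he; rfl
  · simp only [he, ite_false]
    rw [show ((PySem.Dict.ofList [("&", "&amp;"), ("<", "&lt;"), (">", "&gt;"),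
        ("\"", "&quot;"), ("'", "&#x27;"), ("/", "&#x2F;")] : PySem.Dict String String)).items
      = [("&", "&amp;"), ("<", "&lt;"), (">", "&gt;"),
         ("\"", "&quot;"), ("'", "&#x27;"), ("/", "&#x2F;")] from rfl]
    simp only [List.foldl_cons, List.foldl_nil, PySem.Str.replace, PySem.Str.join,
      String.toList_ofList]
    rw [show ("" : String).toList = [] from rfl, pv_join_nil]
    congr 1
    rw [show ("&" : String).toList = ['&'] from rfl, show ("<" : String).toList = ['<'] from rfl,
      show (">" : String).toList = ['>'] from rfl, show ("\"" : String).toList = ['"'] from rfl,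
      show ("'" : String).toList = ['\''] from rfl, show ("/" : String).toList = ['/'] from rfl]
    rw [pv_replace_single, pv_replace_single, pv_replace_single, pv_replace_single,
      pv_replace_single, pv_replace_single]
    rw [pv_main, List.map_map, ← List.flatMap_def]
    exact (congrArg text.toList.flatMap (funext fun c => (pv_escapeChar_toList c).symm))
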